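-- pv_equiv track=rewrite | github.com/TatsianaPoto/od | detect.py | limit_boxes
-- ===== SOURCE A (Python) =====
-- def limit_boxes(images_with_boxes):
--     # limit boxes according to boxes_length
--     boxes_length = [4,7,4]
--     curr_len,box_count = 0, 0
--     j = 0
--     for i,(_, boxes) in enumerate(images_with_boxes):
--         j = i
--         curr_len += len(boxes)
--         if curr_len >= boxes_length[box_count]:
--             curr_len = 0
--             box_count +=1
--         if box_count == len(boxes_length):
--             break
--     return images_with_boxes[:j+1]
-- ===== SOURCE B (Python) =====
-- def limit_boxes(images_with_boxes):
--     # Nested decomposition: one outer pass per budget, inner loop consumes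
--     # images until the budget is met; overflow is discarded per budget.
--     boxes_length = [4, 7, 4]
--     taken = 0
--     rest = images_with_boxes
--     for budget in boxes_length:
--         curr = 0
--         while rest:
--             _, boxes = rest[0]
--             rest = rest[1:]
--             taken += 1
--             curr += len(boxes)
--             if curr >= budget:
--                 break
--     return images_with_boxes[:taken]
-- ===== Notes on version B (the rewrite author's own statement) =====
-- stated objective: alternative
-- what changed: Replaced the single indexed pass with threshold-counter state (curr_len, box_count, j) by a budget-driven nested decomposition: an outer loop over the three budgets and an inner loop consuming images until each budget is met, returning the count of consumed images.
import Mathlib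
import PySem

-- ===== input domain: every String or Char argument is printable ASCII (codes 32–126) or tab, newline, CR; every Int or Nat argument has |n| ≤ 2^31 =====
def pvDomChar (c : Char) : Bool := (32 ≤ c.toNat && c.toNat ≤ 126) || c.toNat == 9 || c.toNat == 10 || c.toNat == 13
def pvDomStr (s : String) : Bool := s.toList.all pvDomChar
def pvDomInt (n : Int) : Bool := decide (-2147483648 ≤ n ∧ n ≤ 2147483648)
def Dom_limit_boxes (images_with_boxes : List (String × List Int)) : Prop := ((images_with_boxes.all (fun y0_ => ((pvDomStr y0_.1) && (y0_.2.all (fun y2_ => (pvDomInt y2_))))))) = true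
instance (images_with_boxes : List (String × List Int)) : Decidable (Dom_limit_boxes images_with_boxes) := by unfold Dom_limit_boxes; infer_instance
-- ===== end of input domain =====

-- B restructures A's single indexed pass (state curr_len/box_count/j) into an
-- outer loop over the budgets [4,7,4] with an inner loop consuming images.

-- ===== PORT A =====
-- the loop of A: state (i, curr_len, box_count, j); returns the final j.
-- boxes_length[box_count] is always in range when evaluated (box_count ∈ {0,1,2},
-- since the loop breaks as soon as box_count reaches 3), so .getD 0 is never taken.
def limitA_loop : List (String × List Int) → Int → Int → Int → Int → Int
  | [], _, _, _, j => j
  | (_, boxes) :: rest, i, curr_len, box_count, _ =>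
      let j := i
      let curr_len := curr_len + (boxes.length : Int)
      let st :=
        if curr_len ≥ (PySem.List.pyGet? ([4, 7, 4] : List Int) box_count).getD 0 then
          ((0 : Int), box_count + 1)
        else (curr_len, box_count)
      if st.2 = 3 then j
      else limitA_loop rest (i + 1) st.1 st.2 j

def limit_boxes (images_with_boxes : List (String × List Int)) : List (String × List Int) :=
  PySem.List.slice images_with_boxes none (some (limitA_loop images_with_boxes 0 0 0 0 + 1))

-- ===== PORT B =====
-- inner while loop: consume images until curr ≥ budget; returns (rest, taken)
def limitB_inner (budget : Int) : List (String × List Int) → Int → Int → List (String × List Int) × Int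
  | [], _, taken => ([], taken)
  | (_, boxes) :: rest, curr, taken =>
      let taken := taken + 1
      let curr := curr + (boxes.length : Int)
      if curr ≥ budget then (rest, taken)
      else limitB_inner budget rest curr taken

-- outer for loop over the budgets
def limitB_outer : List Int → List (String × List Int) → Int → Int
  | [], _, taken => taken
  | b :: bs, rest, taken =>
      let st := limitB_inner b rest 0 taken
      limitB_outer bs st.1 st.2

def limit_boxes_alt (images_with_boxes : List (String × List Int)) : List (String × List Int) :=
  PySem.List.slice images_with_boxes none (some (limitB_outer [4, 7, 4] images_with_boxes 0))

-- ===== PRECONDITION & SPEC =====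
def Spec_limit_boxes (images_with_boxes : List (String × List Int)) (out : List (String × List Int)) : Prop := out = limit_boxes_alt images_with_boxes
instance (images_with_boxes : List (String × List Int)) (out : List (String × List Int)) : Decidable (Spec_limit_boxes images_with_boxes out) := by unfold Spec_limit_boxes; infer_instance

-- ===== CLAIM (what is proved, stated in full; the proofs are below) =====
def Claim_equal_limit_boxes : Prop := ∀ (images_with_boxes : List (String × List Int)), Dom_limit_boxes images_with_boxes → Spec_limit_boxes images_with_boxes (limit_boxes images_with_boxes)

-- ===== LEMMAS AND PROOFS =====

-- fused form of B's two loops (proof helper): budgets, curr, images, taken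
def Brun : List Int → Int → List (String × List Int) → Int → Int
  | [], _, _, taken => taken
  | _ :: _, _, [], taken => taken
  | b :: bs, curr, (_, boxes) :: rest, taken =>
      let taken := taken + 1
      let curr := curr + (boxes.length : Int)
      if curr ≥ b then Brun bs 0 rest taken
      else Brun (b :: bs) curr rest taken

theorem limitB_outer_nil : ∀ (bs : List Int) (t : Int), limitB_outer bs [] t = t := by
  intro bs t
  induction bs with
  | nil => rfl
  | cons b bs ih => simp [limitB_outer, limitB_inner, ih]

theorem Brun_eq_outer :
    ∀ (l : List (String × List Int)) (b : Int) (bs : List Int) (curr t : Int),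
      Brun (b :: bs) curr l t = limitB_outer bs (limitB_inner b l curr t).1 (limitB_inner b l curr t).2 := by
  intro l
  induction l with
  | nil => intro b bs curr t; simp [Brun, limitB_inner, limitB_outer_nil]
  | cons x rest ih =>
      intro b bs curr t
      obtain ⟨s, boxes⟩ := x
      simp only [Brun, limitB_inner]
      split
      · cases bs with
        | nil => simp [Brun, limitB_outer]
        | cons b' bs' => simp [limitB_outer, ih]
      · exact ih b bs _ _

-- core correspondence: A's loop at state box_count = 0/1/2 with stored j = t - 1
-- equals B's fused loop on the corresponding remaining budgets, shifted by one.
theorem A_eq_Brun :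
    ∀ (l : List (String × List Int)) (curr t : Int),
      (limitA_loop l t curr 0 (t - 1) + 1 = Brun [4, 7, 4] curr l t) ∧
      (limitA_loop l t curr 1 (t - 1) + 1 = Brun [7, 4] curr l t) ∧
      (limitA_loop l t curr 2 (t - 1) + 1 = Brun [4] curr l t) := by
  intro l
  induction l with
  | nil =>
      intro curr t
      refine ⟨?_, ?_, ?_⟩ <;> simp [limitA_loop, Brun]
  | cons x rest ih =>
      intro curr t
      obtain ⟨s, boxes⟩ := x
      have ht : t + 1 - 1 = t := by ring
      have ih0 := ih 0 (t + 1)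
      have ihc := ih (curr + (boxes.length : Int)) (t + 1)
      rw [ht] at ih0 ihc
      refine ⟨?_, ?_, ?_⟩ <;>
      · simp only [limitA_loop, Brun, PySem.List.pyGet?, PySem.List.pyIdx?]
        norm_num
        split
        · simp_all
        · simp_all

-- the stored j is overwritten on the first iteration, so it is irrelevant for a
-- nonempty list
theorem limitA_loop_j_irrel (x : String × List Int) (rest : List (String × List Int))
    (i curr bc j j' : Int) :
    limitA_loop (x :: rest) i curr bc j = limitA_loop (x :: rest) i curr bc j' := by
  obtain ⟨s, boxes⟩ := x
  simp only [limitA_loop]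

-- ===== VERDICT (by name: the statement is the Claim_ definition above) =====
theorem limit_boxes_spec : Claim_equal_limit_boxes := by
  intro l _
  unfold Spec_limit_boxes limit_boxes limit_boxes_alt
  cases l with
  | nil => simp [limitA_loop, limitB_outer_nil, PySem.List.slice]
  | cons x rest =>
      have h1 : limitA_loop (x :: rest) 0 0 0 0 = limitA_loop (x :: rest) 0 0 0 (0 - 1) :=
        limitA_loop_j_irrel x rest 0 0 0 0 (0 - 1)
      have h2 := (A_eq_Brun (x :: rest) 0 0).1
      have h3 := Brun_eq_outer (x :: rest) 4 [7, 4] 0 0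
      rw [h1]
      have : limitA_loop (x :: rest) 0 0 0 (0 - 1) + 1 = limitB_outer [4, 7, 4] (x :: rest) 0 := by
        rw [h2, h3]; rfl
      rw [this]
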